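-- pv_equiv track=rewrite | github.com/butterflyforever/Chinese-Words-Segmentation | ChineseWordsSegmentation.py | werty
-- ===== SOURCE A (Python) =====
-- def werty(a):
--     d=[48,49,50,51,52,53,54,55,56,57]
--     b=[65,66,67,68,69,70,71,72,73,74,75,76,77,78,79,80,81,82,83,84,85,86,87,88,89,90]
--     c=[97,98,99,100,101,102,103,104,105,106,107,108,109,110,111,112,113,114,115,116,117,118,119,120,121,122]
--     i=0
--     op=[]
--     wety=""
--     rty=""
--
--     while i<len(a):
--         u=i
--         while ord(a[i]) in d:
--             wety=wety+a[i]
--             i=i+1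
--             if i>=len(a):
--                 break
--         if len(wety)==1:
--             i=u+1
--             wety=""
--             continue
--         if len(wety)>=2:
--             for j in range(1,len(wety)):
--                 op=op+[u+j]
--             i=u+len(wety)
--             wety=""
--             continue
--         wety=""
--         while ord(a[i]) in b+c:
--             rty=rty+a[i]
--             i=i+1
--             if i>=len(a):
--                 break
--         if len(rty)==1:
--             i=u+1
--             rty=""
--             continue
--         if len(rty)>=2:
--             for j in range(1,len(rty)):
--                 op=op+[u+j]
--             i=u+len(rty)
--             rty=""
--             continue
--         rty=""
--         i=i+1
--     return(op)
-- ===== SOURCE B (Python) =====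
-- def werty(a):
--     def cat(ch):
--         o = ord(ch)
--         if 48 <= o <= 57:
--             return 1
--         if 65 <= o <= 90 or 97 <= o <= 122:
--             return 2
--         return 0
--     return [i for i in range(1, len(a))
--             if cat(a[i]) != 0 and cat(a[i]) == cat(a[i - 1])]
-- ===== Notes on version B (the rewrite author's own statement) =====
-- stated objective: faster
-- what changed: A scans with nested while-loops over separate digit and letter runs and grows the result with quadratic op=op+[..] re-copying; B classifies each character once into digit/letter/neither and emits, in a single comprehension, every index whose character has the same non-neither category as its predecessor.
import Mathlib
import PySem

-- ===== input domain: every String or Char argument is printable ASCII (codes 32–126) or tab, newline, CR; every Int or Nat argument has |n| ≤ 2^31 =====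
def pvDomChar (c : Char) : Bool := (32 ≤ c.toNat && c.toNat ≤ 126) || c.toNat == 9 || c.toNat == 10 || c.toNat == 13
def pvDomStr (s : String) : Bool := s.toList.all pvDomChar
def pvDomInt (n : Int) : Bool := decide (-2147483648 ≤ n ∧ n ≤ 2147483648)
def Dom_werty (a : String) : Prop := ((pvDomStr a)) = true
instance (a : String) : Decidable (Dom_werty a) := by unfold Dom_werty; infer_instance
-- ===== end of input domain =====

-- B replaces A's hand-rolled run-scanning while-loops (with op=op+[..] list re-copying)
-- by a single comprehension over adjacent character categories.

-- ===== PORT A =====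
-- the literal constant lists d, b, c from A
def pvD : List Int := [48,49,50,51,52,53,54,55,56,57]
def pvB : List Int := [65,66,67,68,69,70,71,72,73,74,75,76,77,78,79,80,81,82,83,84,85,86,87,88,89,90]
def pvC : List Int := [97,98,99,100,101,102,103,104,105,106,107,108,109,110,111,112,113,114,115,116,117,118,119,120,121,122]

-- inner while loop `while ord(a[i]) in d: wety += a[i]; i += 1; if i>=len: break`
def pvDigRun (s : List Char) (i : Nat) (acc : List Char) : List Char × Nat :=
  if h : i < s.length then
    if ((s[i].toNat : Int)) ∈ pvD then
      pvDigRun s (i+1) (acc ++ [s[i]])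
    else (acc, i)
  else (acc, i)
termination_by s.length - i
decreasing_by omega

-- inner while loop over b+c (letters)
def pvAlpRun (s : List Char) (i : Nat) (acc : List Char) : List Char × Nat :=
  if h : i < s.length then
    if ((s[i].toNat : Int)) ∈ pvB ++ pvC then
      pvAlpRun s (i+1) (acc ++ [s[i]])
    else (acc, i)
  else (acc, i)
termination_by s.length - i
decreasing_by omega

-- the outer while loop of A
def pvLoop (s : List Char) (i : Nat) (op : List Int) : List Int :=
  if h : i < s.length then
    let u := i
    let wety := (pvDigRun s i []).1
    if h1 : wety.length = 1 then pvLoop s (u+1) op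
    else if h2 : 2 ≤ wety.length then
      pvLoop s (u + wety.length)
        ((List.range' 1 (wety.length - 1)).foldl (fun acc j => acc ++ [((u + j : Nat) : Int)]) op)
    else
      let rty := (pvAlpRun s i []).1
      if h3 : rty.length = 1 then pvLoop s (u+1) op
      else if h4 : 2 ≤ rty.length then
        pvLoop s (u + rty.length)
          ((List.range' 1 (rty.length - 1)).foldl (fun acc j => acc ++ [((u + j : Nat) : Int)]) op)
      else pvLoop s (i+1) op
  else op
termination_by s.length - i
decreasing_by
  all_goals first
    | omega
    | (simp only [wety] at h2; omega)
    | (simp only [rty] at h4; omega)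

def werty (a : String) : List Int := pvLoop a.toList 0 []

-- ===== PORT B =====
-- per-character category: 1 = digit, 2 = letter, 0 = other
def pvCat (c : Char) : Int :=
  let o : Int := c.toNat
  if 48 ≤ o ∧ o ≤ 57 then 1
  else if (65 ≤ o ∧ o ≤ 90) ∨ (97 ≤ o ∧ o ≤ 122) then 2
  else 0

def werty_alt (a : String) : List Int :=
  let s := a.toList
  ((List.range' 1 (s.length - 1)).filter
    (fun i => decide (pvCat (s.getD i ' ') ≠ 0 ∧ pvCat (s.getD i ' ') = pvCat (s.getD (i-1) ' ')))).map
    (fun i => (i : Int))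

-- ===== PRECONDITION & SPEC =====
def Spec_werty (a : String) (out : List Int) : Prop := out = werty_alt a
instance (a : String) (out : List Int) : Decidable (Spec_werty a out) := by unfold Spec_werty; infer_instance

-- ===== CLAIM (what is proved, stated in full; the proofs are below) =====
def Claim_equal_werty : Prop := ∀ (a : String), Dom_werty a → Spec_werty a (werty a)

-- ===== LEMMAS AND PROOFS =====

-- the filter predicate of B, as a function of the index
def pvCond (s : List Char) (i : Nat) : Bool :=
  decide (pvCat (s.getD i ' ') ≠ 0 ∧ pvCat (s.getD i ' ') = pvCat (s.getD (i-1) ' '))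

-- B's remaining output from index i on (indices < max i 1 excluded)
def pvTail (s : List Char) (i : Nat) : List Int :=
  ((List.range' (max i 1) (s.length - max i 1)).filter (pvCond s)).map (fun i => (i : Int))

lemma pvCat_eq_one (c : Char) : pvCat c = 1 ↔ ((c.toNat : Int)) ∈ pvD := by
  simp [pvCat, pvD]; split_ifs <;> omega

lemma pvCat_eq_two (c : Char) : pvCat c = 2 ↔ ((c.toNat : Int)) ∈ pvB ++ pvC := by
  simp [pvCat, pvB, pvC]; split_ifs <;> omega

lemma pvCat_cases (c : Char) : pvCat c = 0 ∨ pvCat c = 1 ∨ pvCat c = 2 := by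
  simp only [pvCat]; split_ifs <;> simp

-- spec of the digit inner loop: run length, all-digit content, non-digit boundary
lemma pvDigRun_spec (s : List Char) (i : Nat) (acc : List Char) (hi : i ≤ s.length) :
    ∃ n, (pvDigRun s i acc).1.length = acc.length + n ∧ i + n ≤ s.length ∧
      (∀ k, k < n → pvCat (s.getD (i+k) ' ') = 1) ∧
      (i + n < s.length → pvCat (s.getD (i+n) ' ') ≠ 1) := by
  fun_induction pvDigRun s i acc with
  | case1 i acc h hmem ih =>
    obtain ⟨n, hlen, hle, hin, hbd⟩ := ih (by omega)
    refine ⟨n+1, by simp only [List.length_append, List.length_singleton] at hlen; omega,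
      by omega, ?_, ?_⟩
    · intro k hk
      cases k with
      | zero => simpa [List.getD, List.getElem?_eq_getElem h, pvCat_eq_one] using hmem
      | succ k' =>
        have : i + (k' + 1) = i + 1 + k' := by omega
        rw [this]; exact hin k' (by omega)
    · intro hlt
      have h2 : i + (n + 1) = i + 1 + n := by omega
      rw [h2]; exact hbd (by omega)
  | case2 i acc h hmem =>
    exact ⟨0, by simp, by omega, by omega, fun hlt => by
      simpa [List.getD, List.getElem?_eq_getElem h, pvCat_eq_one] using hmem⟩
  | case3 i acc h =>
    exact ⟨0, by simp, by omega, by omega, fun hlt => absurd hlt (by omega)⟩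

-- same spec for the letter inner loop
lemma pvAlpRun_spec (s : List Char) (i : Nat) (acc : List Char) (hi : i ≤ s.length) :
    ∃ n, (pvAlpRun s i acc).1.length = acc.length + n ∧ i + n ≤ s.length ∧
      (∀ k, k < n → pvCat (s.getD (i+k) ' ') = 2) ∧
      (i + n < s.length → pvCat (s.getD (i+n) ' ') ≠ 2) := by
  fun_induction pvAlpRun s i acc with
  | case1 i acc h hmem ih =>
    obtain ⟨n, hlen, hle, hin, hbd⟩ := ih (by omega)
    refine ⟨n+1, by simp only [List.length_append, List.length_singleton] at hlen; omega,
      by omega, ?_, ?_⟩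
    · intro k hk
      cases k with
      | zero => simpa [List.getD, List.getElem?_eq_getElem h, pvCat_eq_two] using hmem
      | succ k' =>
        have : i + (k' + 1) = i + 1 + k' := by omega
        rw [this]; exact hin k' (by omega)
    · intro hlt
      have h2 : i + (n + 1) = i + 1 + n := by omega
      rw [h2]; exact hbd (by omega)
  | case2 i acc h hmem =>
    exact ⟨0, by simp, by omega, by omega, fun hlt => by
      simpa [List.getD, List.getElem?_eq_getElem h, pvCat_eq_two] using hmem⟩
  | case3 i acc h =>
    exact ⟨0, by simp, by omega, by omega, fun hlt => absurd hlt (by omega)⟩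

lemma pvTail_nil (s : List Char) (i : Nat) (h : s.length ≤ i) : pvTail s i = [] := by
  unfold pvTail
  have e : s.length - max i 1 = 0 := by omega
  rw [e]; simp

lemma pvTail_cons (s : List Char) (i : Nat) (h1 : 1 ≤ i) (h2 : i < s.length) :
    pvTail s i = (if pvCond s i then [(i : Int)] else []) ++ pvTail s (i+1) := by
  unfold pvTail
  have e1 : max i 1 = i := by omega
  have e2 : max (i+1) 1 = i+1 := by omega
  have e3 : s.length - i = (s.length - (i+1)) + 1 := by omega
  rw [e1, e2, e3, List.range'_succ, List.filter_cons]
  split_ifs <;> simp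

lemma pvTail_skip (s : List Char) (i : Nat) (hi : i < s.length)
    (hhead : i = 0 ∨ pvCond s i = false) :
    pvTail s i = pvTail s (i+1) := by
  rcases hhead with h0 | hc
  · subst h0; rfl
  · rcases Nat.eq_zero_or_pos i with h0 | h1
    · subst h0; rfl
    · rw [pvTail_cons s i h1 hi, hc]; simp

lemma pvTail_run_aux (s : List Char) (i n : Nat) (v : Int) (hv : v ≠ 0)
    (hle : i + n ≤ s.length)
    (hin : ∀ k, k < n → pvCat (s.getD (i+k) ' ') = v) :
    ∀ k, 1 ≤ k → k ≤ n →
      pvTail s (i+k) = ((List.range' (i+k) (n-k)).map (fun j => (j : Int))) ++ pvTail s (i+n) := by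
  intro k hk1 hk2
  induction hd : n - k generalizing k with
  | zero =>
    have : k = n := by omega
    subst this; simp
  | succ m ih =>
    have hkn : k < n := by omega
    have ha : pvCat (s.getD (i+k) ' ') = v := hin k hkn
    have hb : pvCat (s.getD (i+k-1) ' ') = v := by
      have e0 : i + k - 1 = i + (k-1) := by omega
      rw [e0]; exact hin (k-1) (by omega)
    have hcond : pvCond s (i+k) = true := by
      unfold pvCond
      exact decide_eq_true ⟨by rw [ha]; exact hv, by rw [ha, hb]⟩
    rw [pvTail_cons s (i+k) (by omega) (by omega), hcond, if_pos rfl]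
    have e : i + k + 1 = i + (k+1) := by omega
    rw [e, ih (k+1) (by omega) (by omega) (by omega)]
    have hm : m = n - (k+1) := by omega
    rw [hm]
    rw [List.range'_succ]
    simp [e]

-- splitting B's tail across a run of length n ≥ 2 of category v starting at i
lemma pvTail_run (s : List Char) (i n : Nat) (v : Int) (hv : v ≠ 0) (hn : 2 ≤ n)
    (hle : i + n ≤ s.length)
    (hin : ∀ k, k < n → pvCat (s.getD (i+k) ' ') = v)
    (hhead : i = 0 ∨ pvCond s i = false) :
    pvTail s i = ((List.range' (i+1) (n-1)).map (fun j => (j : Int))) ++ pvTail s (i+n) := by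
  rw [pvTail_skip s i (by omega) hhead]
  exact pvTail_run_aux s i n v hv hle hin 1 le_rfl (by omega)

-- A's appended indices u+1 … u+n-1 are B's indices in absolute form
lemma pvMap_shift (u : Nat) : ∀ (a n : Nat),
    (List.range' a n).map (fun j => ((u + j : Nat) : Int))
      = (List.range' (u + a) n).map (fun j => (j : Int)) := by
  intro a n
  induction n generalizing a with
  | zero => simp
  | succ m ih =>
    have e : u + (a + 1) = u + a + 1 := by omega
    rw [List.range'_succ, List.range'_succ]
    have h2 := ih (a+1)
    rw [e] at h2
    simpa using congrArg (fun t => (((u + a : Nat) : Int)) :: t) h2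

-- main invariant: A's outer loop from i produces op ++ B's tail from i,
-- provided index i itself is not a non-leading run member (or i = 0)
lemma pvLoop_eq_aux (s : List Char) : ∀ (m i : Nat) (op : List Int), s.length - i ≤ m →
    i ≤ s.length → (i = 0 ∨ s.length ≤ i ∨ pvCond s i = false) →
    pvLoop s i op = op ++ pvTail s i := by
  intro m
  induction m with
  | zero =>
    intro i op hm hi _
    rw [pvLoop, dif_neg (by omega), pvTail_nil s i (by omega)]; simp
  | succ m ih =>
    intro i op hm hi hh
    by_cases h : i < s.length
    · have hh' : i = 0 ∨ pvCond s i = false := by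
        rcases hh with h0 | h0 | h0
        · exact Or.inl h0
        · omega
        · exact Or.inr h0
      rw [pvLoop, dif_pos h]
      obtain ⟨nd, hdlen, hdle, hdin, hdbd⟩ := pvDigRun_spec s i [] (by omega)
      simp only [List.length_nil, Nat.zero_add] at hdlen
      simp only [hdlen]
      rcases Nat.lt_or_ge nd 2 with hnd2 | hnd2
      · rcases (by omega : nd = 0 ∨ nd = 1) with h0 | h1
        · -- no digit at i: fall through to the letter loop
          subst h0
          rw [dif_neg (by omega), dif_neg (by omega)]
          have hd0 : pvCat (s.getD i ' ') ≠ 1 := by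
            have := hdbd (by omega); simpa using this
          obtain ⟨na, halen, hale, hain, habd⟩ := pvAlpRun_spec s i [] (by omega)
          simp only [List.length_nil, Nat.zero_add] at halen
          simp only [halen]
          rcases Nat.lt_or_ge na 2 with hna2 | hna2
          · rcases (by omega : na = 0 ∨ na = 1) with g0 | g1
            · -- 'other' character at i: skip it
              subst g0
              rw [dif_neg (by omega), dif_neg (by omega)]
              have ha0 : pvCat (s.getD i ' ') ≠ 2 := by
                have := habd (by omega); simpa using this
              have hc0 : pvCat (s.getD i ' ') = 0 := by
                rcases pvCat_cases (s.getD i ' ') with h' | h' | h' <;> tauto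
              have hcondi : pvCond s i = false := by
                unfold pvCond
                rw [decide_eq_false_iff_not]
                rintro ⟨hz, _⟩; exact hz hc0
              have hnext : i + 1 = 0 ∨ s.length ≤ i + 1 ∨ pvCond s (i + 1) = false := by
                by_cases hb : i + 1 < s.length
                · refine Or.inr (Or.inr ?_)
                  unfold pvCond
                  rw [decide_eq_false_iff_not]
                  rintro ⟨hz, he⟩
                  have e0 : i + 1 - 1 = i := by omega
                  rw [e0, hc0] at he
                  exact hz he
                · exact Or.inr (Or.inl (by omega))
              rw [ih (i+1) op (by omega) (by omega) hnext,
                pvTail_skip s i h (Or.inr hcondi)]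
            · -- single letter at i: A skips it
              subst g1
              rw [dif_pos rfl]
              have hci : pvCat (s.getD i ' ') = 2 := by
                have := hain 0 (by omega); simpa using this
              have hnext : i + 1 = 0 ∨ s.length ≤ i + 1 ∨ pvCond s (i + 1) = false := by
                by_cases hb : i + 1 < s.length
                · refine Or.inr (Or.inr ?_)
                  unfold pvCond
                  rw [decide_eq_false_iff_not]
                  rintro ⟨hz, he⟩
                  have e0 : i + 1 - 1 = i := by omega
                  rw [e0, hci] at he
                  exact habd hb he
                · exact Or.inr (Or.inl (by omega))
              rw [ih (i+1) op (by omega) (by omega) hnext, pvTail_skip s i h hh']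
          · -- letter run of length na ≥ 2
            rw [dif_neg (by omega), dif_pos hna2]
            rw [PySem.List.foldl_append_singleton_eq_map]
            have hnext : i + na = 0 ∨ s.length ≤ i + na ∨ pvCond s (i + na) = false := by
              by_cases hb : i + na < s.length
              · refine Or.inr (Or.inr ?_)
                unfold pvCond
                rw [decide_eq_false_iff_not]
                rintro ⟨_, he⟩
                have e0 : i + na - 1 = i + (na - 1) := by omega
                rw [e0, hain (na-1) (by omega)] at he
                exact habd hb he
              · exact Or.inr (Or.inl (by omega))
            rw [ih (i + na) _ (by omega) (by omega) hnext]
            rw [pvTail_run s i na 2 two_ne_zero hna2 hale hain hh']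
            rw [pvMap_shift i 1 (na - 1), List.append_assoc]
        · -- single digit at i: A skips it
          rw [dif_pos h1]
          subst h1
          have hci : pvCat (s.getD i ' ') = 1 := by
            have := hdin 0 (by omega); simpa using this
          have hnext : i + 1 = 0 ∨ s.length ≤ i + 1 ∨ pvCond s (i + 1) = false := by
            by_cases hb : i + 1 < s.length
            · refine Or.inr (Or.inr ?_)
              unfold pvCond
              rw [decide_eq_false_iff_not]
              rintro ⟨hz, he⟩
              have e0 : i + 1 - 1 = i := by omega
              rw [e0, hci] at he
              exact hdbd hb he
            · exact Or.inr (Or.inl (by omega))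
          rw [ih (i+1) op (by omega) (by omega) hnext, pvTail_skip s i h hh']
      · -- digit run of length nd ≥ 2
        rw [dif_neg (by omega), dif_pos hnd2]
        rw [PySem.List.foldl_append_singleton_eq_map]
        have hnext : i + nd = 0 ∨ s.length ≤ i + nd ∨ pvCond s (i + nd) = false := by
          by_cases hb : i + nd < s.length
          · refine Or.inr (Or.inr ?_)
            unfold pvCond
            rw [decide_eq_false_iff_not]
            rintro ⟨_, he⟩
            have e0 : i + nd - 1 = i + (nd - 1) := by omega
            rw [e0, hdin (nd-1) (by omega)] at he
            exact hdbd hb he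
          · exact Or.inr (Or.inl (by omega))
        rw [ih (i + nd) _ (by omega) (by omega) hnext]
        rw [pvTail_run s i nd 1 one_ne_zero hnd2 hdle hdin hh']
        rw [pvMap_shift i 1 (nd - 1), List.append_assoc]
    · rw [pvLoop, dif_neg h, pvTail_nil s i (by omega)]; simp

-- ===== VERDICT (by name: the statement is the Claim_ definition above) =====
theorem werty_spec : Claim_equal_werty := by
  intro a _
  unfold Spec_werty werty
  rw [pvLoop_eq_aux a.toList (a.toList.length) 0 [] (by omega) (by omega) (Or.inl rfl)]
  rfl
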